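-- pv_equiv track=rewrite | github.com/autumndr3ams/algorithm | 2018 카카오 기출/셔틀버스.py | solution
-- ===== SOURCE A (Python) =====
-- def solution(n, t, m, timetable):
--     answer = ''
--     crew = [int(time[:2])*60+int(time[3:]) for time in timetable]
--     crew.sort()
--     bus = [9*60+t*i for i in range(n)]
--
--     total = 0 #이때까지 셔틀을 탄 사람, 다음 버스에 오를 크루의 인덱스
--     for btime in bus:
--         cnt=0 #한 버스에 탄 크루의 수
--         while cnt<m and total<len(crew) and crew[total]<=btime:
--             total+=1
--             cnt+=1
--         if cnt<m: answer = btime #버스에 자리가 남았을 때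
--         else: answer = crew[total-1]-1 #맨 마지막 크루보다 1분 먼저 도착
--     answer = str(answer//60).zfill(2)+":"+str(answer%60).zfill(2)
--     return answer
-- ===== SOURCE B (Python) =====
-- def solution(n, t, m, timetable):
--     crew = sorted(int(s[:2]) * 60 + int(s[3:]) for s in timetable)
--
--     def count_le(limit):
--         # binary search: number of crew arrival times <= limit
--         lo, hi = 0, len(crew)
--         while lo < hi:
--             mid = (lo + hi) // 2
--             if crew[mid] <= limit:
--                 lo = mid + 1
--             else:
--                 hi = mid
--         return lo
--
--     total = 0
--     answer = ''
--     for i in range(n):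
--         btime = 9 * 60 + t * i
--         boarded = max(0, min(m, count_le(btime) - total))
--         total += boarded
--         if boarded < m:
--             answer = btime
--         else:
--             answer = crew[total - 1] - 1
--     return str(answer // 60).zfill(2) + ":" + str(answer % 60).zfill(2)
-- ===== Notes on version B (the rewrite author's own statement) =====
-- stated objective: alternative
-- what changed: The inner two-pointer while loop that advances `total` one crew at a time is replaced by a per-bus binary search counting eligible crew (count_le = bisect_right), from which the number boarded is computed arithmetically as max(0, min(m, eligible - total)); parsing+sorting is a single sorted(...) over a generator.
import Mathlib
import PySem

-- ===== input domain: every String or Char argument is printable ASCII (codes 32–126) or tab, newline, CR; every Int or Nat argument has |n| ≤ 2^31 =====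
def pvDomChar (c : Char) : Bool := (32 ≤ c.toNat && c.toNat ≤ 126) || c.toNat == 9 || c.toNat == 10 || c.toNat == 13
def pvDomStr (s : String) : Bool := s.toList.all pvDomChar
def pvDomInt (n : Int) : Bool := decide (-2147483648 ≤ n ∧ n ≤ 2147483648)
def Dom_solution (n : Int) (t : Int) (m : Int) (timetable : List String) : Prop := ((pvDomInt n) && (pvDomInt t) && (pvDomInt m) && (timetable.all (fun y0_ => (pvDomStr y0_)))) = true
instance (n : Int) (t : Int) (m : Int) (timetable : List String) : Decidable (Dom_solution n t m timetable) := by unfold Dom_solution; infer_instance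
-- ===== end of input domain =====

-- B replaces A's inner two-pointer while loop with a per-bus binary search for the number of
-- eligible crew plus an arithmetic clamp for the number boarded (alternative decomposition; not
-- claimed faster). Equivalence is about the return value; A sorts only its own local list.

-- ===== PORT A =====
-- int(time[:2])*60 + int(time[3:])  (none = ValueError of int())
def aParse (time : String) : Option Int := do
  let h ← PySem.Int.ofStr? (PySem.Str.slice time none (some 2))
  let mi ← PySem.Int.ofStr? (PySem.Str.slice time (some 3) none)
  pure (h * 60 + mi)

-- the inner while loop; crew[total] is in range whenever the guard holds (total only grows from 0)
def aWhile (m : Int) (crew : List Int) (btime : Int) (total cnt : Int) : Int × Int :=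
  if cnt < m ∧ total < (crew.length : Int) ∧ PySem.List.pyGetD crew total 0 ≤ btime then
    aWhile m crew btime (total + 1) (cnt + 1)
  else (total, cnt)
termination_by (m - cnt).toNat
decreasing_by omega

def solution (n : Int) (t : Int) (m : Int) (timetable : List String) : String :=
  match timetable.mapM aParse with
  | none => ""   -- int() raises ValueError here; excluded by Pre_solution
  | some crew0 =>
    let crew := PySem.List.sorted crew0 (fun x => x) false
    let bus := (PySem.List.pyRange 0 n 1).map (fun i => 9 * 60 + t * i)
    -- answer : Option Int, none = the initial '' (on which Python's final '' // 60 would raise)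
    let st := bus.foldl (fun (s : Int × Option Int) btime =>
        let tc := aWhile m crew btime s.1 0
        if tc.2 < m then (tc.1, some btime)
        else (tc.1, some (PySem.List.pyGetD crew (tc.1 - 1) 0 - 1)))
      (0, none)
    match st.2 with
    | none => ""   -- answer still '': Python raises TypeError; excluded by Pre_solution (1 ≤ n)
    | some a =>
      PySem.Str.zfill (PySem.Int.toStr (PySem.Int.floordiv a 60)) 2 ++ ":" ++
      PySem.Str.zfill (PySem.Int.toStr (PySem.Int.mod a 60)) 2

-- ===== PORT B =====
def bParse (s : String) : Option Int :=
  (PySem.Int.ofStr? (PySem.Str.slice s none (some 2))).bind fun h =>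
    (PySem.Int.ofStr? (PySem.Str.slice s (some 3) none)).map fun mi => h * 60 + mi

-- count_le: binary search for the number of crew times ≤ limit
def bCountLe (crew : List Int) (limit : Int) (lo hi : Int) : Int :=
  if h : lo < hi then
    let mid := PySem.Int.floordiv (lo + hi) 2
    if PySem.List.pyGetD crew mid 0 ≤ limit then bCountLe crew limit (mid + 1) hi
    else bCountLe crew limit lo mid
  else lo
termination_by (hi - lo).toNat
decreasing_by
  · have h1 := (PySem.Int.le_floordiv_iff_mul_le (a := lo + hi) (b := 2) (q := lo) (by omega)).mpr (by omega)
    omega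
  · have h2 := (PySem.Int.floordiv_lt_iff_lt_mul (a := lo + hi) (b := 2) (q := hi) (by omega)).mpr (by omega)
    omega

def solution_alt (n : Int) (t : Int) (m : Int) (timetable : List String) : String :=
  match timetable.mapM bParse with
  | none => ""   -- int() raises; excluded by Pre_solution
  | some crew0 =>
    let crew := PySem.List.sorted crew0 (fun x => x) false
    let st := (PySem.List.pyRange 0 n 1).foldl (fun (s : Int × Option Int) i =>
        let btime := 9 * 60 + t * i
        let boarded := max 0 (min m (bCountLe crew btime 0 (crew.length : Int) - s.1))
        if boarded < m then (s.1 + boarded, some btime)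
        else (s.1 + boarded, some (PySem.List.pyGetD crew (s.1 + boarded - 1) 0 - 1)))
      (0, none)
    match st.2 with
    | none => ""
    | some a =>
      PySem.Str.zfill (PySem.Int.toStr (PySem.Int.floordiv a 60)) 2 ++ ":" ++
      PySem.Str.zfill (PySem.Int.toStr (PySem.Int.mod a 60)) 2

-- ===== PRECONDITION & SPEC =====
-- Pre_ admits exactly the inputs where Python A returns: every timetable entry must parse
-- (else int() raises ValueError), 1 ≤ n (else answer stays '' and '' // 60 raises TypeError),
-- and if m ≤ 0 the crew list must be nonempty (else crew[-1] raises IndexError).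
def Pre_solution (n : Int) (t : Int) (m : Int) (timetable : List String) : Prop :=
  1 ≤ n ∧
  (∀ s ∈ timetable, (PySem.Int.ofStr? (PySem.Str.slice s none (some 2))).isSome = true ∧
                    (PySem.Int.ofStr? (PySem.Str.slice s (some 3) none)).isSome = true) ∧
  (1 ≤ m ∨ timetable ≠ [])
instance (n : Int) (t : Int) (m : Int) (timetable : List String) : Decidable (Pre_solution n t m timetable) := by unfold Pre_solution; infer_instance

def pvWitness_solution : Int × Int × Int × List String := (2, 10, 1, ["09:05", "08:00", "09:01"])

def Spec_solution (n : Int) (t : Int) (m : Int) (timetable : List String) (out : String) : Prop := out = solution_alt n t m timetable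
instance (n : Int) (t : Int) (m : Int) (timetable : List String) (out : String) : Decidable (Spec_solution n t m timetable out) := by unfold Spec_solution; infer_instance

-- ===== CLAIM (what is proved, stated in full; the proofs are below) =====
def Claim_equal_solution : Prop := ∀ (n : Int) (t : Int) (m : Int) (timetable : List String), Dom_solution n t m timetable → Pre_solution n t m timetable → Spec_solution n t m timetable (solution n t m timetable)

-- ===== LEMMAS AND PROOFS =====

-- number of crew times ≤ limit
def eligAux (crew : List Int) (limit : Int) : Nat := crew.countP (fun c => c ≤ limit)

-- in a sorted list, the elements ≤ limit are exactly the first eligAux ones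
lemma sorted_index_iff (crew : List Int) (limit : Int) (hp : crew.Pairwise (· ≤ ·)) :
    ∀ i : Nat, (hi : i < crew.length) → (crew[i] ≤ limit ↔ i < eligAux crew limit) := by
  induction crew with
  | nil => intro i hi; simp at hi
  | cons x xs ih =>
    rcases List.pairwise_cons.mp hp with ⟨hx, hxs⟩
    intro i hi
    by_cases hxl : x ≤ limit
    · have hcount : eligAux (x :: xs) limit = eligAux xs limit + 1 := by
        simp [eligAux, hxl]
      rw [hcount]
      cases i with
      | zero => simp [hxl]
      | succ j =>
        have hj : j < xs.length := by simpa using hi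
        have := ih hxs j hj
        simp only [List.getElem_cons_succ]
        omega
    · have hz : eligAux (x :: xs) limit = 0 := by
        apply List.countP_eq_zero.mpr
        intro a ha
        rcases List.mem_cons.mp ha with rfl | hmem
        · simpa using hxl
        · have := hx a hmem; simp; omega
      rw [hz]
      cases i with
      | zero => simp [hxl]
      | succ j =>
        have hj : j < xs.length := by simpa using hi
        simp only [List.getElem_cons_succ]
        have : limit < xs[j] := by have := hx xs[j] (List.getElem_mem hj); omega
        omega

-- A's while loop boards exactly max 0 (min (m - cnt) (eligible - total)) crew
lemma aWhile_eq (m : Int) (crew : List Int) (btime : Int) (hp : crew.Pairwise (· ≤ ·)) :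
    ∀ total cnt : Int, 0 ≤ total →
      aWhile m crew btime total cnt =
        (total + max 0 (min (m - cnt) ((eligAux crew btime : Int) - total)),
         cnt + max 0 (min (m - cnt) ((eligAux crew btime : Int) - total))) := by
  intro total cnt
  induction total, cnt using aWhile.induct m crew btime with
  | case1 total cnt hguard ih =>
    intro htot
    rw [aWhile, if_pos hguard]
    obtain ⟨h1, h2, h3⟩ := hguard
    have htn : total.toNat < crew.length := by omega
    have hget : PySem.List.pyGetD crew total 0 = crew[total.toNat] :=
      PySem.List.pyGetD_eq_getElem crew 0 htot (by omega)
    have hlt : (total.toNat : Nat) < eligAux crew btime :=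
      (sorted_index_iff crew btime hp total.toNat htn).mp (by rw [← hget]; exact h3)
    have hE : total < (eligAux crew btime : Int) := by omega
    rw [ih (by omega)]
    simp only [Prod.mk.injEq]
    constructor <;> omega
  | case2 total cnt hguard =>
    intro htot
    rw [aWhile, if_neg hguard]
    have hEle := List.countP_le_length (p := fun c => decide (c ≤ btime)) (l := crew)
    by_cases h1 : cnt < m
    · by_cases h2 : total < (crew.length : Int)
      · have h3 : ¬ PySem.List.pyGetD crew total 0 ≤ btime := by tauto
        have htn : total.toNat < crew.length := by omega
        have hget : PySem.List.pyGetD crew total 0 = crew[total.toNat] :=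
          PySem.List.pyGetD_eq_getElem crew 0 htot (by omega)
        have := (sorted_index_iff crew btime hp total.toNat htn)
        have hnot : ¬ (total.toNat < eligAux crew btime) := by
          intro hc; exact h3 (by rw [hget]; exact this.mpr hc)
        simp only [Prod.mk.injEq]
        unfold eligAux at *
        constructor <;> omega
      · simp only [Prod.mk.injEq]
        unfold eligAux at *
        constructor <;> omega
    · simp only [Prod.mk.injEq]
      constructor <;> omega

-- B's binary search returns the number of crew times ≤ limit
lemma bCountLe_eq (crew : List Int) (limit : Int) (hp : crew.Pairwise (· ≤ ·)) :
    ∀ lo hi : Int, 0 ≤ lo → lo ≤ hi → hi ≤ (crew.length : Int) →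
      (∀ i : Nat, (i : Int) < lo → (hi' : i < crew.length) → crew[i] ≤ limit) →
      (∀ i : Nat, hi ≤ (i : Int) → (hi' : i < crew.length) → limit < crew[i]) →
      bCountLe crew limit lo hi = (eligAux crew limit : Int) := by
  intro lo hi
  induction lo, hi using bCountLe.induct crew limit with
  | case1 lo hi hlt mid hmid ih =>
    intro h0 hle hlen hlow hhigh
    have hm1 := (PySem.Int.le_floordiv_iff_mul_le (a := lo + hi) (b := 2) (q := lo) (by omega)).mpr (by omega)
    have hm2 := (PySem.Int.floordiv_lt_iff_lt_mul (a := lo + hi) (b := 2) (q := hi) (by omega)).mpr (by omega)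
    rw [bCountLe, dif_pos hlt, if_pos (by exact hmid)]
    have hmn : mid.toNat < crew.length := by omega
    have hget : PySem.List.pyGetD crew mid 0 = crew[mid.toNat] :=
      PySem.List.pyGetD_eq_getElem crew 0 (by omega) (by omega)
    have hE : mid.toNat < eligAux crew limit :=
      (sorted_index_iff crew limit hp mid.toNat hmn).mp (by rw [← hget]; exact hmid)
    refine ih ?_ ?_ ?_ ?_ hhigh
    · omega
    · omega
    · omega
    · intro i hi1 hi2
      exact (sorted_index_iff crew limit hp i hi2).mpr (by omega)
  | case2 lo hi hlt mid hmid ih =>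
    intro h0 hle hlen hlow hhigh
    have hm1 := (PySem.Int.le_floordiv_iff_mul_le (a := lo + hi) (b := 2) (q := lo) (by omega)).mpr (by omega)
    have hm2 := (PySem.Int.floordiv_lt_iff_lt_mul (a := lo + hi) (b := 2) (q := hi) (by omega)).mpr (by omega)
    rw [bCountLe, dif_pos hlt, if_neg (by exact hmid)]
    have hmn : mid.toNat < crew.length := by omega
    have hget : PySem.List.pyGetD crew mid 0 = crew[mid.toNat] :=
      PySem.List.pyGetD_eq_getElem crew 0 (by omega) (by omega)
    have hE : ¬ mid.toNat < eligAux crew limit := by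
      intro hc
      exact hmid (by rw [hget]; exact (sorted_index_iff crew limit hp mid.toNat hmn).mpr hc)
    refine ih h0 ?_ ?_ hlow ?_
    · omega
    · omega
    · intro i hi1 hi2
      have := (sorted_index_iff crew limit hp i hi2)
      by_contra hc
      have : i < eligAux crew limit := this.mp (by omega)
      omega
  | case3 lo hi hlt =>
    intro h0 hle hlen hlow hhigh
    rw [bCountLe, dif_neg hlt]
    have hElen : eligAux crew limit ≤ crew.length := List.countP_le_length
    by_cases hc : (eligAux crew limit : Int) = lo
    · omega
    · rcases lt_or_gt_of_ne hc with hlt2 | hgt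
      · have hn : eligAux crew limit < crew.length := by omega
        have := hlow (eligAux crew limit) (by omega) hn
        have := (sorted_index_iff crew limit hp (eligAux crew limit) hn).mp this
        omega
      · have hn : lo.toNat < crew.length := by omega
        have h1 := (sorted_index_iff crew limit hp lo.toNat hn).mpr (by omega)
        have h2 := hhigh lo.toNat (by omega) hn
        omega

-- the per-bus folds of A and B agree from any state with a nonnegative total
lemma fold_eq (m t : Int) (crew : List Int) (hp : crew.Pairwise (· ≤ ·)) :
    ∀ (l : List Int) (total : Int) (ans : Option Int), 0 ≤ total →
      l.foldl (fun (s : Int × Option Int) i =>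
          let tc := aWhile m crew (9 * 60 + t * i) s.1 0
          if tc.2 < m then (tc.1, some (9 * 60 + t * i))
          else (tc.1, some (PySem.List.pyGetD crew (tc.1 - 1) 0 - 1))) (total, ans) =
      l.foldl (fun (s : Int × Option Int) i =>
          let btime := 9 * 60 + t * i
          let boarded := max 0 (min m (bCountLe crew btime 0 (crew.length : Int) - s.1))
          if boarded < m then (s.1 + boarded, some btime)
          else (s.1 + boarded, some (PySem.List.pyGetD crew (s.1 + boarded - 1) 0 - 1))) (total, ans) := by
  intro l
  induction l with
  | nil => intro total ans h; rfl
  | cons i rest ih =>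
    intro total ans htot
    simp only [List.foldl_cons]
    have hB : bCountLe crew (9 * 60 + t * i) 0 (crew.length : Int) =
        (eligAux crew (9 * 60 + t * i) : Int) := by
      refine bCountLe_eq crew (9 * 60 + t * i) hp 0 (crew.length : Int) le_rfl (by positivity) le_rfl ?_ ?_
      · intro j hj1 hj2; omega
      · intro j hj1 hj2; omega
    set d := max 0 (min m ((eligAux crew (9 * 60 + t * i) : Int) - total)) with hd
    have hd0 : 0 ≤ d := le_max_left _ _
    have hA : aWhile m crew (9 * 60 + t * i) total 0 = (total + d, d) := by
      rw [aWhile_eq m crew (9 * 60 + t * i) hp total 0 htot]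
      simp [hd]
    simp only [hA, hB, ← hd]
    by_cases hlt : d < m
    · rw [if_pos hlt]
      exact ih (total + d) _ (by omega)
    · rw [if_neg hlt]
      exact ih (total + d) _ (by omega)

-- Pre_'s parse conditions make aParse succeed
lemma aParse_isSome (s : String)
    (h1 : (PySem.Int.ofStr? (PySem.Str.slice s none (some 2))).isSome = true)
    (h2 : (PySem.Int.ofStr? (PySem.Str.slice s (some 3) none)).isSome = true) :
    (aParse s).isSome = true := by
  unfold aParse
  cases hv1 : PySem.Int.ofStr? (PySem.Str.slice s none (some 2)) with
  | none => rw [hv1] at h1; simp at h1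
  | some v1 =>
    cases hv2 : PySem.Int.ofStr? (PySem.Str.slice s (some 3) none) with
    | none => rw [hv2] at h2; simp at h2
    | some v2 => simp

lemma mapM_aParse_isSome (l : List String)
    (h : ∀ s ∈ l, (aParse s).isSome = true) : (l.mapM aParse).isSome = true := by
  induction l with
  | nil => simp
  | cons x xs ih =>
    simp only [List.mapM_cons]
    cases hx : aParse x with
    | none => have := h x (by simp); rw [hx] at this; simp at this
    | some v =>
      cases hxs : xs.mapM aParse with
      | none =>
        have := ih (fun s hs => h s (by simp [hs]))
        rw [hxs] at this; simp at this
      | some vs => simp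

lemma bParse_eq_aParse : bParse = aParse := by
  funext s
  simp only [bParse, aParse]
  generalize PySem.Int.ofStr? (PySem.Str.slice s none (some 2)) = o1
  generalize PySem.Int.ofStr? (PySem.Str.slice s (some 3) none) = o2
  cases o1 with
  | none => rfl
  | some v1 =>
    cases o2 with
    | none => rfl
    | some v2 => rfl

-- ===== VERDICT (by name: the statement is the Claim_ definition above) =====
theorem solution_spec : Claim_equal_solution := by
  intro n t m timetable hdom hpre
  obtain ⟨hn, hparse, hm⟩ := hpre
  unfold Spec_solution solution solution_alt
  rw [bParse_eq_aParse]
  cases hcrew : timetable.mapM aParse with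
  | none =>
    have := mapM_aParse_isSome timetable
      (fun s hs => aParse_isSome s (hparse s hs).1 (hparse s hs).2)
    simp [hcrew] at this
  | some crew0 =>
    simp only
    have hp : (PySem.List.sorted crew0 (fun x => x) false).Pairwise (· ≤ ·) := by
      have := PySem.List.sorted_pairwise (xs := crew0) (key := fun x => x)
      exact this
    rw [List.foldl_map]
    rw [fold_eq m t (PySem.List.sorted crew0 (fun x => x) false) hp
        (PySem.List.pyRange 0 n 1) 0 none le_rfl]
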